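-- pv_equiv track=rewrite | github.com/sdfrew2/pmakit | selection.py | check_contiguous_pair
-- ===== SOURCE A (Python) =====
-- def trace(s, x):
--     result = []
--     while x != 0:
--         v = s[x]
--         result.append(v)
--         x = x & ~(1<<v)
--     return result
--
-- def check_contiguous_pair(s, parent, child):
--     if parent & child == 0:
--         return True
--     t = trace(s, parent)
--     prevInChild = False
--     foundUpEdge = False
--     for x in t:
--         inChild = (1 << x) & child != 0
--         isEdge = inChild and not prevInChild
--         if foundUpEdge and isEdge:
--             return False
--         foundUpEdge |= isEdge
--         prevInChild = inChild
--     return True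
-- ===== SOURCE B (Python) =====
-- def trace(s, x):
--     result = []
--     while x != 0:
--         v = s[x]
--         result.append(v)
--         x = x & ~(1<<v)
--     return result
--
-- def check_contiguous_pair(s, parent, child):
--     # Three-phase scan: skip the prefix outside child, skip the first run inside
--     # child, then require that nothing inside child remains.
--     if parent & child == 0:
--         return True
--     rest = trace(s, parent)
--     while rest and (1 << rest[0]) & child == 0:
--         rest = rest[1:]
--     while rest and (1 << rest[0]) & child != 0:
--         rest = rest[1:]
--     return all((1 << x) & child == 0 for x in rest)
-- ===== Notes on version B (the rewrite author's own statement) =====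
-- stated objective: simpler
-- what changed: Replaces A's stateful edge-counting loop (prevInChild/foundUpEdge flags with an early return) by a stateless three-phase decomposition: drop the leading out-of-child prefix of the trace, drop the first in-child run, and check that no in-child element remains.
-- outside the precondition, e.g. on check_contiguous_pair({5: 0, 4: 2, 1: 99}, 5, 1): A returns True, B returns True
import Mathlib
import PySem

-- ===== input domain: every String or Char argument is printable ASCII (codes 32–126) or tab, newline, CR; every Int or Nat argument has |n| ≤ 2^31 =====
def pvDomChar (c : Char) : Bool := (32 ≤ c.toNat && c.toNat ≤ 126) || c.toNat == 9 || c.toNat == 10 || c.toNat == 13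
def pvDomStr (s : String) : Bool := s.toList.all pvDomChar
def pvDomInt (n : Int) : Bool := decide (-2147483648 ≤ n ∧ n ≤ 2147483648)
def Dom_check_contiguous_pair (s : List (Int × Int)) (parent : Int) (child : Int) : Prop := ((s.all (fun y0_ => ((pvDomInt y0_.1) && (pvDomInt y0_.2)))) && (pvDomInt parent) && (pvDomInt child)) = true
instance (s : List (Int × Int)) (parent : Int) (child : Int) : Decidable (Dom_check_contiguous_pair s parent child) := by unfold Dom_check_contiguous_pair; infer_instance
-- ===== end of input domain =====

-- B replaces A's stateful edge-counting loop by a stateless three-phase scan (skip prefix, skip first in-child run, check the rest); objective: simpler.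

-- ===== PORT A =====
-- dict lookup s[x]: first match in the association list (none = KeyError, excluded by Pre_)
def pvGet (s : List (Int × Int)) (k : Int) : Option Int :=
  (s.find? (fun p => p.1 == k)).map (·.2)

-- trace's while loop; fuel makes it total (inside Pre_ the fuel is never exhausted
-- and every lookup succeeds, so it is exactly Python's trace)
def traceA (s : List (Int × Int)) : Nat → Int → List Int
  | 0, _ => []
  | fuel + 1, x =>
    if x == 0 then []
    else
      match pvGet s x with
      | none => []
      | some v => v :: traceA s fuel (PySem.Int.band x (Int.not ((1 : Int) <<< v.toNat)))

-- A's for-loop with its two running flags and early return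
def loopA (child : Int) (prevInChild foundUpEdge : Bool) : List Int → Bool
  | [] => true
  | x :: r =>
    let inChild : Bool := (PySem.Int.band ((1 : Int) <<< x.toNat) child) != 0
    let isEdge : Bool := inChild && !prevInChild
    if foundUpEdge && isEdge then false
    else loopA child inChild (foundUpEdge || isEdge) r

def check_contiguous_pair (s : List (Int × Int)) (parent : Int) (child : Int) : Bool :=
  if PySem.Int.band parent child == 0 then true
  else loopA child false false (traceA s (parent.natAbs + 1) parent)

-- ===== PORT B =====
-- first while loop of B: drop the leading elements outside child
def skipOut (child : Int) : List Int → List Int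
  | [] => []
  | x :: r => if (PySem.Int.band ((1 : Int) <<< x.toNat) child) == 0 then skipOut child r else x :: r

-- second while loop of B: drop the first run inside child
def skipIn (child : Int) : List Int → List Int
  | [] => []
  | x :: r => if (PySem.Int.band ((1 : Int) <<< x.toNat) child) != 0 then skipIn child r else x :: r

def check_contiguous_pair_alt (s : List (Int × Int)) (parent : Int) (child : Int) : Bool :=
  if PySem.Int.band parent child == 0 then true
  else
    (skipIn child (skipOut child (traceA s (parent.natAbs + 1) parent))).all
      (fun x => (PySem.Int.band ((1 : Int) <<< x.toNat) child) == 0)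

-- ===== PRECONDITION & SPEC =====
-- Pre_ excludes the inputs on which A's trace raises KeyError or never terminates
-- (parent ≤ 0 with parent&child≠0, a chain key missing, a value whose bit is not set
-- in its key); to stay closed-form it constrains every nonzero-submask-of-parent key
-- of s, so it also excludes some inputs where an unreached junk entry exists although
-- A returns (see cites).
def goodStep (s : List (Int × Int)) (k : Int) : Bool :=
  match pvGet s k with
  | none => false
  | some v =>
    decide (0 ≤ v) && decide (v < 62) &&
      (PySem.Int.band ((1 : Int) <<< v.toNat) k != 0) &&
      (PySem.Int.band k (Int.not ((1 : Int) <<< v.toNat)) == 0 ||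
        (pvGet s (PySem.Int.band k (Int.not ((1 : Int) <<< v.toNat)))).isSome)

def Pre_check_contiguous_pair (s : List (Int × Int)) (parent : Int) (child : Int) : Prop :=
  PySem.Int.band parent child = 0 ∨
    (0 < parent ∧ (pvGet s parent).isSome ∧
      ∀ p ∈ s, p.1 ≠ 0 → PySem.Int.band p.1 parent = p.1 → goodStep s p.1 = true)

instance (s : List (Int × Int)) (parent : Int) (child : Int) : Decidable (Pre_check_contiguous_pair s parent child) := by
  unfold Pre_check_contiguous_pair; infer_instance

def pvWitness_check_contiguous_pair : (List (Int × Int)) × Int × Int := ([(5, 0), (4, 2)], 5, 1)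

def Spec_check_contiguous_pair (s : List (Int × Int)) (parent : Int) (child : Int) (out : Bool) : Prop := out = check_contiguous_pair_alt s parent child
instance (s : List (Int × Int)) (parent : Int) (child : Int) (out : Bool) : Decidable (Spec_check_contiguous_pair s parent child out) := by unfold Spec_check_contiguous_pair; infer_instance

-- ===== CLAIM (what is proved, stated in full; the proofs are below) =====
def Claim_equal_check_contiguous_pair : Prop := ∀ (s : List (Int × Int)) (parent : Int) (child : Int), Dom_check_contiguous_pair s parent child → Pre_check_contiguous_pair s parent child → Spec_check_contiguous_pair s parent child (check_contiguous_pair s parent child)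

-- ===== LEMMAS AND PROOFS =====

-- A's flag automaton has three reachable states; each corresponds to one phase of B.
theorem loopA_eq_phases (child : Int) (t : List Int) :
    loopA child false false t
      = (skipIn child (skipOut child t)).all (fun x => (PySem.Int.band ((1 : Int) <<< x.toNat) child) == 0) ∧
    loopA child true true t
      = (skipIn child t).all (fun x => (PySem.Int.band ((1 : Int) <<< x.toNat) child) == 0) ∧
    loopA child false true t
      = t.all (fun x => (PySem.Int.band ((1 : Int) <<< x.toNat) child) == 0) := by
  induction t with
  | nil => simp [loopA, skipOut, skipIn]
  | cons x r ih =>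
    obtain ⟨ih0, ih1, ih2⟩ := ih
    by_cases h : (PySem.Int.band ((1 : Int) <<< x.toNat) child) = 0
    · simp [loopA, skipOut, skipIn, h, ih0, ih2]
    · have hb : ((PySem.Int.band ((1 : Int) <<< x.toNat) child) != 0) = true := by simp [h]
      simp [loopA, skipOut, skipIn, h, hb, ih1]

theorem check_contiguous_pair_eq_alt (s : List (Int × Int)) (parent child : Int) :
    check_contiguous_pair s parent child = check_contiguous_pair_alt s parent child := by
  unfold check_contiguous_pair check_contiguous_pair_alt
  by_cases h : PySem.Int.band parent child = 0 <;> simp [h, (loopA_eq_phases child _).1]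

-- ===== VERDICT (by name: the statement is the Claim_ definition above) =====
theorem check_contiguous_pair_spec : Claim_equal_check_contiguous_pair := by
  intro s parent child _ _
  exact check_contiguous_pair_eq_alt s parent child
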